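-- pv_equiv track=rewrite | github.com/jeromegit/fixations | fixations/fix_utils.py | create_comment_row
-- ===== SOURCE A (Python) =====
-- from typing import Dict, Union, List, Tuple, Set
--
-- def create_comment_row(fix_lines) -> Union[None | List[str]]:
--     cols = ['#', 'COMMENT']
--     comments_are_present = False
--     for (_, _, comment) in fix_lines:
--         if comment:
--             comments_are_present = True
--             cols.append(comment)
--         else:
--             cols.append('')
--
--     return cols if comments_are_present else None
-- ===== SOURCE B (Python) =====
-- def _comments(lines):
--     """Return the comment column for `lines` if some comment in it is truthy, else None."""
--     if not lines:
--         return None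
--     c = lines[0][2]
--     rest = _comments(lines[1:])
--     if rest is not None:
--         return [c or ''] + rest
--     if c:
--         return [c] + [''] * (len(lines) - 1)
--     return None
--
-- def create_comment_row(fix_lines):
--     tail = _comments(list(fix_lines))
--     return None if tail is None else ['#', 'COMMENT'] + tail
-- ===== Notes on version B (the rewrite author's own statement) =====
-- stated objective: alternative
-- what changed: Replaces A's iterative loop with a mutable presence flag by a recursive helper on the list structure that returns the comment column as an Optional (None = no comment in the suffix), padding with blanks when the first comment found is the last one.
import Mathlib
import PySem

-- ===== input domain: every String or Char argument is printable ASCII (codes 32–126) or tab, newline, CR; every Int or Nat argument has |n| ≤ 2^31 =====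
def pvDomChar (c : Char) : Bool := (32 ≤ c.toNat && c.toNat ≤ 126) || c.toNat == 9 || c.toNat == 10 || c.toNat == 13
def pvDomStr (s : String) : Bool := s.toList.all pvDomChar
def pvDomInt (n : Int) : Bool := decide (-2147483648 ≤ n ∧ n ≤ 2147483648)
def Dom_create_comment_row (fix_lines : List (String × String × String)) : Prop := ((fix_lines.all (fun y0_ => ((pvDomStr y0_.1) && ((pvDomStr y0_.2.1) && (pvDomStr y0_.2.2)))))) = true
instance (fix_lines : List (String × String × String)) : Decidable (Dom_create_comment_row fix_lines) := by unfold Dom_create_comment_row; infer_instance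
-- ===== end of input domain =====

-- B replaces A's loop-with-flag by structural recursion returning an Optional comment column
-- (objective: alternative decomposition, same result).

-- ===== PORT A =====
-- The loop becomes a foldl over (cols, comments_are_present); "if comment:" is string truthiness (≠ "").
def create_comment_row (fix_lines : List (String × String × String)) : Option (List String) :=
  let st := fix_lines.foldl
    (fun (st : List String × Bool) t =>
      if t.2.2 ≠ "" then (st.1 ++ [t.2.2], true) else (st.1 ++ [""], st.2))
    (["#", "COMMENT"], false)
  if st.2 then some st.1 else none

-- ===== PORT B =====
-- B's recursive helper: the comment column of `lines` if some comment there is nonempty, else none.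
def ccr_comments : List (String × String × String) → Option (List String)
  | [] => none
  | t :: rest =>
    match ccr_comments rest with
    | some r => some ((if t.2.2 ≠ "" then t.2.2 else "") :: r)
    | none =>
      if t.2.2 ≠ "" then some (t.2.2 :: List.replicate rest.length "") else none

def create_comment_row_alt (fix_lines : List (String × String × String)) : Option (List String) :=
  match ccr_comments fix_lines with
  | none => none
  | some tail => some (["#", "COMMENT"] ++ tail)

-- ===== PRECONDITION & SPEC =====
def Spec_create_comment_row (fix_lines : List (String × String × String)) (out : Option (List String)) : Prop := out = create_comment_row_alt fix_lines
instance (fix_lines : List (String × String × String)) (out : Option (List String)) : Decidable (Spec_create_comment_row fix_lines out) := by unfold Spec_create_comment_row; infer_instance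

-- ===== CLAIM (what is proved, stated in full; the proofs are below) =====
def Claim_equal_create_comment_row : Prop := ∀ (fix_lines : List (String × String × String)), Dom_create_comment_row fix_lines → Spec_create_comment_row fix_lines (create_comment_row fix_lines)

-- ===== LEMMAS AND PROOFS =====
-- A's fold characterised: it appends the mapped comment column and ors the presence flags.
theorem foldl_char (l : List (String × String × String)) :
    ∀ (cols : List String) (flag : Bool),
    l.foldl (fun (st : List String × Bool) t =>
      if t.2.2 ≠ "" then (st.1 ++ [t.2.2], true) else (st.1 ++ [""], st.2)) (cols, flag)
      = (cols ++ l.map (fun t => if t.2.2 ≠ "" then t.2.2 else ""),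
         flag || l.any (fun t => t.2.2 ≠ "")) := by
  induction l with
  | nil => simp
  | cons h tl ih =>
    intro cols flag
    by_cases hc : h.2.2 = ""
    · rw [List.foldl_cons, if_neg (by simp [hc]), ih]; simp [hc]
    · rw [List.foldl_cons, if_pos hc, ih]; simp [hc]

-- If no comment in l is nonempty, the mapped comment column is all blanks.
theorem map_eq_replicate (l : List (String × String × String))
    (h : l.any (fun t => t.2.2 ≠ "") = false) :
    l.map (fun t => if t.2.2 ≠ "" then t.2.2 else "") = List.replicate l.length "" := by
  induction l with
  | nil => rfl
  | cons hd tl ih =>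
    simp only [List.any_cons, Bool.or_eq_false_iff] at h
    simp only [List.map_cons, List.length_cons, List.replicate_succ, ih h.2]
    have : ¬ hd.2.2 ≠ "" := by simpa using h.1
    simp [this]

-- B's helper characterised against the same canonical form.
theorem ccr_comments_char (l : List (String × String × String)) :
    ccr_comments l = if l.any (fun t => t.2.2 ≠ "") then
        some (l.map (fun t => if t.2.2 ≠ "" then t.2.2 else "")) else none := by
  induction l with
  | nil => rfl
  | cons hd tl ih =>
    have step : ccr_comments (hd :: tl) = (match ccr_comments tl with
      | some r => some ((if hd.2.2 ≠ "" then hd.2.2 else "") :: r)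
      | none => if hd.2.2 ≠ "" then some (hd.2.2 :: List.replicate tl.length "") else none) := rfl
    rw [step, ih, List.any_cons, List.map_cons]
    by_cases ha : (tl.any fun t => decide (t.2.2 ≠ "")) = true
    · rw [if_pos ha, ha, Bool.or_true, if_pos rfl]
    · have ha' : (tl.any fun t => decide (t.2.2 ≠ "")) = false := by simpa using ha
      rw [if_neg ha, ha', Bool.or_false]
      have hrep := map_eq_replicate tl ha'
      by_cases hc : hd.2.2 = ""
      · simp [hc]
      · simp [hc]
        refine hrep.symm.trans (List.map_congr_left fun t _ => ?_)
        by_cases h : t.2.2 = "" <;> simp [h]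

-- ===== VERDICT (by name: the statement is the Claim_ definition above) =====
theorem create_comment_row_spec : Claim_equal_create_comment_row := by
  intro l _
  unfold Spec_create_comment_row create_comment_row create_comment_row_alt
  rw [foldl_char, ccr_comments_char]
  simp only [ne_eq, Bool.false_or]
  by_cases h : (l.any fun t => decide ¬t.2.2 = "") = true
  · rw [if_pos h, if_pos h]
  · rw [if_neg h, if_neg h]
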